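-- pv_equiv track=rewrite | github.com/ChenYi0725/senior_project | tools/data_organizer.py | _mediapipe_node_to_index
-- ===== SOURCE A (Python) =====
-- def _mediapipe_node_to_index(input_list):
--     index = []
--     for i in input_list:
--         index.append(i * 2)
--         index.append(i * 2 + 1)
--     second_hand = []
--     for i in index:
--         second_hand.append(i + 42)
--     index.extend(second_hand)
--     return index
-- ===== SOURCE B (Python) =====
-- def _mediapipe_node_to_index(input_list):
--     first = [x for i in input_list for x in (i * 2, i * 2 + 1)]
--     second = [x for i in input_list for x in (i * 2 + 42, i * 2 + 43)]
--     return first + second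
-- ===== Notes on version B (the rewrite author's own statement) =====
-- stated objective: simpler
-- what changed: Replaces the three phases (append loop, shift-map over the built list, extend) by two comprehensions over the input, computing the shifted values directly from each input element, concatenated once.
import Mathlib
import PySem

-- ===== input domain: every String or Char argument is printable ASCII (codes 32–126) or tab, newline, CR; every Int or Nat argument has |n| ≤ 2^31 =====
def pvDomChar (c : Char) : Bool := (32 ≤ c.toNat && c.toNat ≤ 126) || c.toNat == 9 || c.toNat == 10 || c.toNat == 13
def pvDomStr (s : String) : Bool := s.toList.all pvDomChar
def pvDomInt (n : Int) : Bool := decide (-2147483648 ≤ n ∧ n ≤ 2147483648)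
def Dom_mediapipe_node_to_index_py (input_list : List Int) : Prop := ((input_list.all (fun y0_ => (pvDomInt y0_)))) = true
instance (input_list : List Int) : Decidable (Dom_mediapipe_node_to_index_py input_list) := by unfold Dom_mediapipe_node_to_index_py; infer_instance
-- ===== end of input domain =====

-- B replaces A's three phases (append loop, shift-map over the built list, extend) by two
-- comprehensions over the input with the shifts computed directly; return value equivalence.

-- ===== PORT A =====
def mediapipe_node_to_index_py (input_list : List Int) : List Int :=
  let index := input_list.foldl (fun acc i => acc ++ [i * 2] ++ [i * 2 + 1]) []
  let second_hand := index.foldl (fun acc i => acc ++ [i + 42]) []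
  index ++ second_hand

-- ===== PORT B =====
def mediapipe_node_to_index_py_alt (input_list : List Int) : List Int :=
  let first := input_list.flatMap (fun i => [i * 2, i * 2 + 1])
  let second := input_list.flatMap (fun i => [i * 2 + 42, i * 2 + 43])
  first ++ second

-- ===== PRECONDITION & SPEC =====
def Spec_mediapipe_node_to_index_py (input_list : List Int) (out : List Int) : Prop := out = mediapipe_node_to_index_py_alt input_list
instance (input_list : List Int) (out : List Int) : Decidable (Spec_mediapipe_node_to_index_py input_list out) := by unfold Spec_mediapipe_node_to_index_py; infer_instance

-- ===== CLAIM (what is proved, stated in full; the proofs are below) =====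
def Claim_equal_mediapipe_node_to_index_py : Prop := ∀ (input_list : List Int), Dom_mediapipe_node_to_index_py input_list → Spec_mediapipe_node_to_index_py input_list (mediapipe_node_to_index_py input_list)

-- ===== LEMMAS AND PROOFS =====
theorem pv_flatMap_map_add (l : List Int) :
    (l.flatMap (fun i => [i * 2, i * 2 + 1])).map (fun i => i + 42)
      = l.flatMap (fun i => [i * 2 + 42, i * 2 + 43]) := by
  induction l with
  | nil => rfl
  | cons a t ih => simp [List.flatMap_cons, ih]; ring

-- ===== VERDICT (by name: the statement is the Claim_ definition above) =====
theorem mediapipe_node_to_index_py_spec : Claim_equal_mediapipe_node_to_index_py := by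
  intro l _
  show _ = _
  unfold mediapipe_node_to_index_py mediapipe_node_to_index_py_alt
  have h1 : l.foldl (fun acc i => acc ++ [i * 2] ++ [i * 2 + 1]) [] =
      l.flatMap (fun i => [i * 2, i * 2 + 1]) := by
    have := PySem.List.foldl_append_eq_flatMap (l := l)
      (g := fun i => [i * 2, i * 2 + 1]) (acc := [])
    simpa [List.append_assoc] using this
  simp only [h1, PySem.List.foldl_append_singleton_eq_map, List.nil_append,
    pv_flatMap_map_add]
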